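-- pv_equiv track=rewrite | github.com/devsulemangondal/dish_genie | convert_json_to_arb.py | convert_to_arb_key
-- ===== SOURCE A (Python) =====
-- def convert_to_arb_key(json_key):
--     """Convert JSON key (e.g., 'common.home') to ARB key (e.g., 'commonHome')"""
--     parts = json_key.split('.')
--     # Capitalize first letter of each part except the first
--     if len(parts) == 1:
--         return parts[0]
--     # First part stays lowercase, rest get capitalized first letter
--     result = parts[0]
--     for part in parts[1:]:
--         if part:
--             result += part[0].upper() + part[1:] if len(part) > 1 else part.upper()
--     return result
-- ===== SOURCE B (Python) =====
-- def convert_to_arb_key(json_key):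
--     """Convert JSON key (e.g., 'common.home') to ARB key (e.g., 'commonHome')"""
--     out = []
--     cap_next = False
--     for ch in json_key:
--         if ch == '.':
--             cap_next = True
--         elif cap_next:
--             out.append(ch.upper())
--             cap_next = False
--         else:
--             out.append(ch)
--     return ''.join(out)
-- ===== Notes on version B (the rewrite author's own statement) =====
-- stated objective: alternative
-- what changed: Replaces split-on-dot-then-rebuild (parts list, length branch, loop over tail parts with per-part slicing) by a single character scan with a cap_next flag that uppercases the first character after any run of dots.
import Mathlib
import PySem

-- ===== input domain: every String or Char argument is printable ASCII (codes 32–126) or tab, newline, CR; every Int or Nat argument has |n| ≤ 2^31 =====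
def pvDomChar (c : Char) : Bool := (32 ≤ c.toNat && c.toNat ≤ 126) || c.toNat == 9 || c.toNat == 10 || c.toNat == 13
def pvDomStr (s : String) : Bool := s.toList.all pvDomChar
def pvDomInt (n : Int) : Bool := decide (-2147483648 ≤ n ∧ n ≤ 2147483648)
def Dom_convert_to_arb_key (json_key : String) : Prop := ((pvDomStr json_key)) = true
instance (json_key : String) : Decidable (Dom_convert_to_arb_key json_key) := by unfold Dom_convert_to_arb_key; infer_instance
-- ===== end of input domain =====

-- B replaces A's split('.')-then-rebuild (parts list, length branch, loop over tail parts)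
-- by a single flag-driven character scan; same return value (objective: alternative).
-- ===== PORT A =====
def pvCapPart (part : List Char) : List Char :=
  if part.length > 1 then PySem.Chars.upperChar part.headI :: part.tail
  else PySem.Chars.upper part

def convert_to_arb_key (json_key : String) : String :=
  let parts : List (List Char) := PySem.Chars.splitOn json_key.toList ['.']
  if parts.length = 1 then String.ofList parts.headI
  else
    let result := parts.headI
    let result := (parts.drop 1).foldl
      (fun result part => if part ≠ [] then result ++ pvCapPart part else result) result
    String.ofList result

-- ===== PORT B =====
def pvStep (st : List Char × Bool) (c : Char) : List Char × Bool :=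
  if c = '.' then (st.1, true)
  else if st.2 then (st.1 ++ [PySem.Chars.upperChar c], false)
  else (st.1 ++ [c], false)

def convert_to_arb_key_alt (json_key : String) : String :=
  String.ofList (json_key.toList.foldl pvStep ([], false)).1

-- ===== PRECONDITION & SPEC =====
def Spec_convert_to_arb_key (json_key : String) (out : String) : Prop := out = convert_to_arb_key_alt json_key
instance (json_key : String) (out : String) : Decidable (Spec_convert_to_arb_key json_key out) := by unfold Spec_convert_to_arb_key; infer_instance

-- ===== CLAIM (what is proved, stated in full; the proofs are below) =====
def Claim_equal_convert_to_arb_key : Prop := ∀ (json_key : String), Dom_convert_to_arb_key json_key → Spec_convert_to_arb_key json_key (convert_to_arb_key json_key)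

-- ===== LEMMAS AND PROOFS =====

-- A's per-part transformation on a nonempty part, normalised
def pvCap (part : List Char) : List Char :=
  match part with
  | [] => []
  | c :: t => PySem.Chars.upperChar c :: t

-- the common value: first split part verbatim, remaining parts first-char-uppercased
def pvF (parts : List (List Char)) : List Char :=
  parts.headI ++ (parts.drop 1).flatMap pvCap

theorem modifyHead_fun_id {α : Type} (l : List α) : List.modifyHead (fun x => x) l = l := by
  cases l <;> rfl

theorem pvCapPart_eq (part : List Char) (h : part ≠ []) : pvCapPart part = pvCap part := by
  cases part with
  | nil => exact absurd rfl h
  | cons c t =>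
    cases t with
    | nil => simp [pvCapPart, pvCap, PySem.Chars.upper]
    | cons d u => simp [pvCapPart, pvCap, List.headI]

theorem foldlA (parts : List (List Char)) (acc : List Char) :
    parts.foldl (fun result part => if part ≠ [] then result ++ pvCapPart part else result) acc
      = acc ++ parts.flatMap pvCap := by
  induction parts generalizing acc with
  | nil => simp
  | cons p rest ih =>
    rw [List.foldl_cons]
    by_cases hp : p = []
    · rw [if_neg (by simp [hp]), ih]
      simp [hp, pvCap]
    · rw [if_pos hp, ih, pvCapPart_eq p hp]
      simp [List.append_assoc]

theorem splitOn_go_spec (fuel : Nat) (l cur : List Char) (acc : List (List Char))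
    (h : l.length ≤ fuel) :
    PySem.Chars.splitOn.go ['.'] fuel l cur acc
      = acc.reverse ++ (List.splitOnP (· == '.') l).modifyHead (cur.reverse ++ ·) := by
  induction fuel generalizing l cur acc with
  | zero =>
    have hl : l = [] := List.eq_nil_of_length_eq_zero (Nat.le_zero.mp h)
    subst hl
    simp [PySem.Chars.splitOn.go, List.splitOnP_nil]
  | succ n ih =>
    cases l with
    | nil => simp [PySem.Chars.splitOn.go, List.splitOnP_nil]
    | cons c rest =>
      rw [PySem.Chars.splitOn.go]
      by_cases hc : c = '.'
      · subst hc
        have hpre : List.isPrefixOf ['.'] ('.' :: rest) = true := by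
          simp [List.isPrefixOf]
        simp only [hpre, if_pos]
        have hd : List.drop (['.'] : List Char).length ('.' :: rest) = rest := rfl
        rw [hd, ih rest [] (cur.reverse :: acc) (by simpa using Nat.le_of_succ_le_succ h)]
        rw [List.splitOnP_cons]
        simp [modifyHead_fun_id]
      · have hpre : List.isPrefixOf ['.'] (c :: rest) = false := by
          simp [List.isPrefixOf]
          exact fun hh => hc hh.symm
        simp only [hpre, Bool.false_eq_true, if_false]
        rw [ih rest (c :: cur) acc (by simpa using Nat.le_of_succ_le_succ h)]
        rw [List.splitOnP_cons]
        have hcb : ((c : Char) == '.') = false := by simp [hc]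
        rw [hcb]
        simp only [Bool.false_eq_true, if_false, List.modifyHead_modifyHead]
        have hf : (fun x : List Char => (c :: cur).reverse ++ x)
            = ((fun x : List Char => cur.reverse ++ x) ∘ List.cons c) := by
          funext x; simp
        rw [hf]

theorem splitOn_eq (l : List Char) :
    PySem.Chars.splitOn l ['.'] = List.splitOnP (· == '.') l := by
  unfold PySem.Chars.splitOn
  rw [splitOn_go_spec _ _ _ _ (by omega)]
  simp [modifyHead_fun_id]

theorem A_eq (s : String) :
    convert_to_arb_key s = String.ofList (pvF (List.splitOnP (· == '.') s.toList)) := by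
  unfold convert_to_arb_key
  rw [splitOn_eq]
  set parts := List.splitOnP (· == '.') s.toList with hp
  by_cases h : parts.length = 1
  · obtain ⟨p, hp1⟩ := List.length_eq_one_iff.mp h
    simp [hp1, pvF]
  · simp only [h, if_false, foldlA]
    rfl

theorem scan_spec (l : List Char) (acc : List Char) :
    (l.foldl pvStep (acc, false)).1 = acc ++ pvF (List.splitOnP (· == '.') l)
    ∧ (l.foldl pvStep (acc, true)).1
        = acc ++ (List.splitOnP (· == '.') l).flatMap pvCap := by
  induction l generalizing acc with
  | nil => simp [pvF, List.splitOnP_nil, pvCap]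
  | cons c rest ih =>
    obtain ⟨hh, tt, hsp⟩ := List.exists_cons_of_ne_nil (List.splitOnP_ne_nil (· == '.') rest)
    by_cases hc : c = '.'
    · subst hc
      have h1 : ∀ b : Bool, pvStep (acc, b) '.' = (acc, true) := by
        intro b; simp [pvStep]
      constructor
      · rw [List.foldl_cons, h1, (ih acc).2, List.splitOnP_cons]
        simp [pvF]
      · rw [List.foldl_cons, h1, (ih acc).2, List.splitOnP_cons]
        simp [pvCap]
    · have hcb : ((c : Char) == '.') = false := by simp [hc]
      constructor
      · have h1 : pvStep (acc, false) c = (acc ++ [c], false) := by simp [pvStep, hc]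
        rw [List.foldl_cons, h1, (ih (acc ++ [c])).1, List.splitOnP_cons, hcb]
        simp [pvF, hsp, List.append_assoc]
      · have h1 : pvStep (acc, true) c = (acc ++ [PySem.Chars.upperChar c], false) := by
          simp [pvStep, hc]
        rw [List.foldl_cons, h1, (ih (acc ++ [PySem.Chars.upperChar c])).1,
          List.splitOnP_cons, hcb]
        simp [pvF, pvCap, hsp, List.append_assoc]

theorem B_eq (s : String) :
    convert_to_arb_key_alt s = String.ofList (pvF (List.splitOnP (· == '.') s.toList)) := by
  unfold convert_to_arb_key_alt
  rw [(scan_spec s.toList []).1]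
  simp

-- ===== VERDICT (by name: the statement is the Claim_ definition above) =====
theorem convert_to_arb_key_spec : Claim_equal_convert_to_arb_key := by
  intro s _
  show _ = _
  rw [A_eq, B_eq]
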